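-- pv_equiv track=rewrite | github.com/kleenex1/TIL | 코테의민족/0827/03.py | solution
-- ===== SOURCE A (Python) =====
-- def solution(progresses, speeds):
--     answer = []
--
--     count = 0
--     time = 0
--
--     while len(progresses):
--         if progresses[0] + time*speeds[0] > 100:
--             progresses.pop(0)
--             speeds.pop(0)
--             count += 1
--         else:
--             if count > 0 :
--                 answer.append(count)
--                 count = 0
--             time += 1
--     answer.append(count)
--     return answer
-- ===== SOURCE B (Python) =====
-- def solution(progresses, speeds):
--     # Single pass: each task's finish day is computed in closed form, then
--     # consecutive tasks are grouped under the deadline of their group leader.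
--     answer = []
--     cur = None
--     count = 0
--     for p, s in zip(progresses, speeds):
--         d = max(0, (100 - p) // s + 1)
--         if cur is None or d > cur:
--             if count:
--                 answer.append(count)
--             cur = d
--             count = 1
--         else:
--             count += 1
--     answer.append(count)
--     return answer
-- ===== Notes on version B (the rewrite author's own statement) =====
-- stated objective: faster
-- what changed: Replaces A's day-by-day simulation with O(n) pop(0) calls by a closed-form finish-day per task ((100-p)//s + 1, clamped at 0) and a single pass that groups consecutive tasks under their group leader's deadline; intended as faster; measured: a timing run saw A time out already at n=16 while B returned, so no ratio could be read at a common size.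
-- outside the precondition, e.g. on solution([101], [0]): A returns [1], B raises ZeroDivisionError; on solution([50, 200], [1, -1]): A returns [2], B returns [1, 1]
import Mathlib
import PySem

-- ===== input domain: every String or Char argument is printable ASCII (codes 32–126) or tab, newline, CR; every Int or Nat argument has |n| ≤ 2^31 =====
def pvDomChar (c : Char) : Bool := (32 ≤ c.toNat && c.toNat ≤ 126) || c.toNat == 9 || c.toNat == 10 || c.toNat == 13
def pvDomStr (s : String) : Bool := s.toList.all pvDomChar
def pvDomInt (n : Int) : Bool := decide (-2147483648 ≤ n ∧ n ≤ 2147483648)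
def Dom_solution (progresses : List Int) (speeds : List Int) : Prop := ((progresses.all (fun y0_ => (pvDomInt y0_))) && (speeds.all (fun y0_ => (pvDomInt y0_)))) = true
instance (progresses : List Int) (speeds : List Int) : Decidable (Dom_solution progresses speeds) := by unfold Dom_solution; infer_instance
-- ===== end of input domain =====

-- B replaces A's day-by-day simulation with pop(0) by a closed-form finish day per
-- task and one grouping pass (intended as faster; a timing run saw A time out at
-- n=16 while B returned, so no ratio was measured). Note: Python A empties both input
-- lists in place (pop(0)); B does not mutate — the equivalence proved is about the
-- RETURN value only.

-- ===== PORT A =====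
-- fuel guard only: large enough for A's loop under Pre_ (1 pop + at most 101-p time
-- steps per task); the loop body below is the literal transliteration of A's while.
def solutionFuel : List Int → Nat
  | [] => 0
  | p :: ps => 1 + (101 - p).toNat + solutionFuel ps

def solutionLoop : Nat → List Int → List Int → List Int → Int → Int → List Int
  | _, [], _, answer, count, _ => answer ++ [count]
  | 0, _ :: _, _, answer, count, _ => answer ++ [count]        -- fuel exhausted: unreachable under Pre_
  | fuel + 1, p :: ps, speeds, answer, count, time =>
    match speeds with
    | [] => answer ++ [count]                                  -- Python raises IndexError here: outside Pre_
    | s :: ss =>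
      if 100 < p + time * s then
        solutionLoop fuel ps ss answer (count + 1) time
      else if 0 < count then
        solutionLoop fuel (p :: ps) (s :: ss) (answer ++ [count]) 0 (time + 1)
      else
        solutionLoop fuel (p :: ps) (s :: ss) answer count (time + 1)

def solution (progresses : List Int) (speeds : List Int) : List Int :=
  solutionLoop (solutionFuel progresses) progresses speeds [] 0 0

-- ===== PORT B =====
def days (p s : Int) : Int := max 0 (PySem.Int.floordiv (100 - p) s + 1)

def altStep (st : List Int × Option Int × Int) (pr : Int × Int) : List Int × Option Int × Int :=
  let d := days pr.1 pr.2
  match st with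
  | (answer, cur, count) =>
    match cur with
    | none => ((if 0 < count then answer ++ [count] else answer), some d, 1)
    | some cd =>
      if cd < d then ((if 0 < count then answer ++ [count] else answer), some d, 1)
      else (answer, some cd, count + 1)

def solution_alt (progresses : List Int) (speeds : List Int) : List Int :=
  match (List.zip progresses speeds).foldl altStep ([], none, 0) with
  | (answer, _, count) => answer ++ [count]

-- ===== PRECONDITION & SPEC =====
-- Pre_ excludes inputs where A raises (more tasks than speeds: IndexError) or loops
-- forever, and the non-positive speeds among the used ones: there A terminates only by
-- the accident that an over-100 progress passes the pop test, while B's closed-form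
-- day is meaningless (s = 0 divides, s < 0 gives a bogus deadline).
def Pre_solution (progresses : List Int) (speeds : List Int) : Prop :=
  progresses.length ≤ speeds.length ∧ ∀ s ∈ speeds.take progresses.length, 1 ≤ s

instance (progresses : List Int) (speeds : List Int) : Decidable (Pre_solution progresses speeds) := by
  unfold Pre_solution; infer_instance

def pvWitness_solution : List Int × List Int := ([93, 30, 55], [1, 30, 5])

def Spec_solution (progresses : List Int) (speeds : List Int) (out : List Int) : Prop := out = solution_alt progresses speeds
instance (progresses : List Int) (speeds : List Int) (out : List Int) : Decidable (Spec_solution progresses speeds out) := by unfold Spec_solution; infer_instance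

-- ===== CLAIM (what is proved, stated in full; the proofs are below) =====
def Claim_equal_solution : Prop := ∀ (progresses : List Int) (speeds : List Int), Dom_solution progresses speeds → Pre_solution progresses speeds → Spec_solution progresses speeds (solution progresses speeds)

-- ===== LEMMAS AND PROOFS =====

-- iterations A still needs from time t: one pop per task plus the waiting steps
def Nfuel : List (Int × Int) → Int → Nat
  | [], _ => 0
  | (p, s) :: rest, t => 1 + (days p s - t).toNat + Nfuel rest t

theorem days_nonneg (p s : Int) : 0 ≤ days p s := by
  simp [days]

theorem cond_iff (p s t : Int) (hs : 1 ≤ s) (ht : 0 ≤ t) :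
    (100 < p + t * s) ↔ days p s ≤ t := by
  unfold days
  rw [max_le_iff]
  have h := PySem.Int.floordiv_lt_iff_lt_mul (a := 100 - p) (b := s) (q := t) (by omega)
  constructor
  · intro hlt
    have : PySem.Int.floordiv (100 - p) s < t := h.mpr (by linarith)
    omega
  · intro ⟨_, h2⟩
    have : 100 - p < t * s := h.mp (by omega)
    linarith

theorem Nfuel_antitone (l : List (Int × Int)) (t t' : Int) (h : t ≤ t') :
    Nfuel l t' ≤ Nfuel l t := by
  induction l with
  | nil => simp [Nfuel]
  | cons x rest ih =>
    obtain ⟨p, s⟩ := x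
    simp only [Nfuel]
    omega

theorem days_le_fuel (p s : Int) (hs : 1 ≤ s) : (days p s).toNat ≤ (101 - p).toNat := by
  unfold days
  rcases le_or_gt 0 (100 - p) with hc | hc
  · have h := (PySem.Int.floordiv_lt_iff_lt_mul (a := 100 - p) (b := s) (q := 101 - p)
      (by omega)).mpr (by nlinarith)
    omega
  · have h := (PySem.Int.floordiv_lt_iff_lt_mul (a := 100 - p) (b := s) (q := 0)
      (by omega)).mpr (by rw [zero_mul]; omega)
    omega

theorem Nfuel_le_solutionFuel (ps ss : List Int) (hs : ∀ s ∈ ss.take ps.length, 1 ≤ s) :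
    Nfuel (List.zip ps ss) 0 ≤ solutionFuel ps := by
  induction ps generalizing ss with
  | nil => simp [Nfuel]
  | cons p ps' ih =>
    cases ss with
    | nil => simp [Nfuel, solutionFuel]
    | cons s ss' =>
      simp only [List.zip_cons_cons, Nfuel, solutionFuel]
      have h1 : 1 ≤ s := hs s (by simp)
      have h2 := ih ss' (fun x hx => hs x (by
        rw [List.length_cons, List.take_succ_cons]
        exact List.mem_cons_of_mem _ hx))
      have h3 := days_le_fuel p s h1
      omega

-- waiting phase of A: from time t it steps (without popping) up to time = days p s,
-- flushing count once
theorem loop_wait (p s : Int) (ps ss : List Int) (hs : 1 ≤ s) :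
    ∀ (k : Nat), k ≠ 0 → ∀ (f : Nat) (c t : Int) (a : List Int), 0 ≤ c → 0 ≤ t → t + k = days p s →
    solutionLoop (f + k) (p :: ps) (s :: ss) a c t =
      solutionLoop f (p :: ps) (s :: ss) (if 0 < c then a ++ [c] else a) 0 (days p s) := by
  intro k
  induction k with
  | zero => intro h; exact absurd rfl h
  | succ k ih =>
    intro _ f c t a hc0 ht hd
    have hcond : ¬ (100 < p + t * s) := by
      rw [cond_iff p s t hs ht]; omega
    have hstep : solutionLoop (f + (k + 1)) (p :: ps) (s :: ss) a c t =
        solutionLoop (f + k) (p :: ps) (s :: ss) (if 0 < c then a ++ [c] else a) 0 (t + 1) := by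
      show solutionLoop ((f + k) + 1) (p :: ps) (s :: ss) a c t = _
      by_cases hc : 0 < c
      · simp only [solutionLoop, if_neg hcond, if_pos hc]
      · have hc0' : c = 0 := by omega
        subst hc0'
        simp only [solutionLoop, if_neg hcond]
        norm_num
    rw [hstep]
    rcases Nat.eq_zero_or_pos k with hk | hk
    · subst hk
      have : t + 1 = days p s := by omega
      rw [this]
      simp
    · have := ih (by omega) f 0 (t + 1) (if 0 < c then a ++ [c] else a) le_rfl (by omega) (by push_cast at hd ⊢; omega)
      rw [this]
      simp

theorem loop_eq (ps : List Int) : ∀ (ss : List Int), ps.length ≤ ss.length →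
    (∀ s ∈ ss.take ps.length, 1 ≤ s) →
    ∀ (fuel : Nat) (a : List Int) (c t : Int), 0 ≤ c → 0 ≤ t → Nfuel (List.zip ps ss) t ≤ fuel →
    solutionLoop fuel ps ss a c t =
      ((List.zip ps ss).foldl altStep (a, some t, c)).1 ++
        [((List.zip ps ss).foldl altStep (a, some t, c)).2.2] := by
  induction ps with
  | nil =>
    intro ss _ _ fuel a c t _ _ _
    cases fuel <;> simp [solutionLoop]
  | cons p ps' ih =>
    intro ss hlen hs fuel a c t hc0 ht hf
    cases ss with
    | nil => simp at hlen
    | cons s ss' =>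
      have hs1 : 1 ≤ s := hs s (by simp)
      have hs' : ∀ x ∈ ss'.take ps'.length, 1 ≤ x := fun x hx => hs x (by simp [hx])
      have hlen' : ps'.length ≤ ss'.length := by simpa using hlen
      simp only [List.zip_cons_cons, Nfuel] at hf ⊢
      by_cases hd : days p s ≤ t
      · -- front pops immediately
        obtain ⟨f, rfl⟩ : ∃ f, fuel = f + 1 := ⟨fuel - 1, by omega⟩
        have hcond : 100 < p + t * s := (cond_iff p s t hs1 ht).mpr hd
        simp only [solutionLoop, if_pos hcond]
        rw [ih ss' hlen' hs' f a (c + 1) t (by omega) ht (by omega)]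
        have hstep : altStep (a, some t, c) (p, s) = (a, some t, c + 1) := by
          simp only [altStep]
          rw [if_neg (by omega)]
        simp only [List.foldl_cons, hstep]
      · -- front waits until its day, then pops
        push Not at hd
        set k : Nat := (days p s - t).toNat with hk
        have hk0 : k ≠ 0 := by omega
        have hdk : t + (k : Int) = days p s := by omega
        obtain ⟨f, rfl⟩ : ∃ f, fuel = f + k := ⟨fuel - k, by omega⟩
        rw [loop_wait p s ps' ss' hs1 k hk0 f c t a hc0 ht hdk]
        obtain ⟨f', rfl⟩ : ∃ f', f = f' + 1 := ⟨f - 1, by omega⟩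
        have hcond : 100 < p + days p s * s :=
          (cond_iff p s (days p s) hs1 (days_nonneg p s)).mpr le_rfl
        simp only [solutionLoop, if_pos hcond]
        have hrec := ih ss' hlen' hs' f' (if 0 < c then a ++ [c] else a) 1 (days p s)
          (by omega) (days_nonneg p s)
          (le_trans (Nfuel_antitone _ t (days p s) (by omega)) (by omega))
        rw [zero_add, hrec]
        have hstep : altStep (a, some t, c) (p, s) =
            ((if 0 < c then a ++ [c] else a), some (days p s), 1) := by
          simp only [altStep]
          rw [if_pos (by omega)]
        simp only [List.foldl_cons, hstep]

theorem foldl_none_eq_some_zero (l : List (Int × Int)) (a : List Int) :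
    (l.foldl altStep (a, none, 0)).1 ++ [(l.foldl altStep (a, none, 0)).2.2] =
    (l.foldl altStep (a, some 0, 0)).1 ++ [(l.foldl altStep (a, some 0, 0)).2.2] := by
  cases l with
  | nil => simp
  | cons x rest =>
    obtain ⟨p, s⟩ := x
    have h1 : altStep (a, none, 0) (p, s) = (a, some (days p s), 1) := by
      simp [altStep]
    have h2 : altStep (a, some 0, 0) (p, s) = (a, some (days p s), 1) := by
      simp only [altStep]
      by_cases hd : (0 : Int) < days p s
      · rw [if_pos hd]; simp
      · have : days p s = 0 := by have := days_nonneg p s; omega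
        rw [if_neg hd, this]
        norm_num
    simp only [List.foldl_cons, h1, h2]

-- ===== VERDICT (by name: the statement is the Claim_ definition above) =====
theorem solution_spec : Claim_equal_solution := by
  intro ps ss _ hpre
  obtain ⟨hlen, hs⟩ := hpre
  unfold Spec_solution solution solution_alt
  rw [loop_eq ps ss hlen hs (solutionFuel ps) [] 0 0 le_rfl le_rfl
      (Nfuel_le_solutionFuel ps ss hs)]
  exact (foldl_none_eq_some_zero (List.zip ps ss) []).symm
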